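-- pv_equiv track=rewrite | github.com/SimHacker/lloooomm | 00-Characters/ground/worm-site-mapper-implementation.py | merge_castings
-- ===== SOURCE A (Python) =====
-- def merge_castings(existing, new):
--     """Merge new casting with existing, preserving valuable data"""
--     # Start with existing as base
--     merged = existing.copy() if existing else {}
--
--     # Update with new data, but preserve certain fields from existing
--     preserve_fields = ['custom_notes', 'manual_edits', 'local_metadata']
--
--     for key, value in new.items():
--         if key not in preserve_fields or key not in merged:
--             merged[key] = value
--
--     # Always update last_crawled
--     merged['last_crawled'] = new['last_crawled']
--
--     return merged
-- ===== SOURCE B (Python) =====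
-- def merge_castings(existing, new):
--     """Merge new casting with existing, preserving valuable data"""
--     PRESERVE = ('custom_notes', 'manual_edits', 'local_metadata')
--     base = dict(existing or {})
--     # pass 1: rewrite every existing entry (kept value for preserved/absent keys, new value otherwise)
--     pairs = []
--     for key, old in base.items():
--         pairs.append((key, old if key in PRESERVE or key not in new else new[key]))
--     # pass 2: append the entries that only exist in new
--     for key, value in new.items():
--         if key not in base:
--             pairs.append((key, value))
--     merged = dict(pairs)
--     # always update last_crawled (raises KeyError if missing, like the original)
--     merged['last_crawled'] = new['last_crawled']
--     return merged
-- ===== Notes on version B (the rewrite author's own statement) =====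
-- stated objective: alternative
-- what changed: B replaces A's imperative insert loop over new (mutating a copy of existing, guarded by membership in the evolving dict) with a two-pass flat-list construction: first rewrite each existing entry choosing old or new value, then append the new-only entries, and build the dict once from that pair list.
import Mathlib
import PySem

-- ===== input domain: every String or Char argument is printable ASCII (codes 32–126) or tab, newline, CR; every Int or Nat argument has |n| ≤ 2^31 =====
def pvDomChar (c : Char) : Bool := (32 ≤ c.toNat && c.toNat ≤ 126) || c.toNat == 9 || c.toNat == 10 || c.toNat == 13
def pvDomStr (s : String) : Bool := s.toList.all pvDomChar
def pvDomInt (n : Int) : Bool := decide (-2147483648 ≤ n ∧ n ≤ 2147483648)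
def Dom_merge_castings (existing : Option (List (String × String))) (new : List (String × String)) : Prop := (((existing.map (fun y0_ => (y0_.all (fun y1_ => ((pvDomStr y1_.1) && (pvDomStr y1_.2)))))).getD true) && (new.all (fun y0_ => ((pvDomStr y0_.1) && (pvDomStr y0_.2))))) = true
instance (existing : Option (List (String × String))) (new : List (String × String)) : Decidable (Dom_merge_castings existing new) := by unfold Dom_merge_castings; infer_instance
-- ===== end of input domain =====

-- B builds a flat pair list in two passes (rewrite existing entries, then append new-only entries)
-- and converts it to a dict once, instead of A's insert loop over new; objective: alternative, same cost.

-- ===== PORT A =====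
def merge_castings (existing : Option (List (String × String))) (new : List (String × String)) : List (String × String) :=
  -- merged = existing.copy() if existing else {}
  let merged : PySem.Dict String String :=
    match existing with
    | none => PySem.Dict.empty
    | some l => if l.isEmpty then PySem.Dict.empty else PySem.Dict.ofList l
  let preserve_fields : List String := ["custom_notes", "manual_edits", "local_metadata"]
  let newd : PySem.Dict String String := PySem.Dict.ofList new
  -- for key, value in new.items(): if key not in preserve_fields or key not in merged: merged[key] = value
  let merged := newd.items.foldl (fun m kv =>
      if !(preserve_fields.contains kv.1) || !(m.contains kv.1) then m.insert kv.1 kv.2 else m) merged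
  -- merged['last_crawled'] = new['last_crawled']  (KeyError when missing: excluded by Pre_)
  match newd.get? "last_crawled" with
  | some v => (merged.insert "last_crawled" v).items
  | none => []

-- ===== PORT B =====
def merge_castings_alt (existing : Option (List (String × String))) (new : List (String × String)) : List (String × String) :=
  let PRESERVE : List String := ["custom_notes", "manual_edits", "local_metadata"]
  -- base = dict(existing or {})
  let base : PySem.Dict String String := PySem.Dict.ofList (existing.getD [])
  let newd : PySem.Dict String String := PySem.Dict.ofList new
  -- pass 1: for key, old in base.items(): pairs.append((key, old if key in PRESERVE or key not in new else new[key]))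
  let pairs : List (String × String) := base.items.foldl (fun acc kv =>
      acc ++ [(kv.1, if PRESERVE.contains kv.1 || !(newd.contains kv.1) then kv.2
                     else (newd.get? kv.1).getD kv.2)]) []
  -- pass 2: for key, value in new.items(): if key not in base: pairs.append((key, value))
  let pairs := newd.items.foldl (fun acc kv =>
      if !(base.contains kv.1) then acc ++ [kv] else acc) pairs
  -- merged = dict(pairs); merged['last_crawled'] = new['last_crawled']  (KeyError when missing: excluded by Pre_)
  let merged := PySem.Dict.ofList pairs
  match newd.get? "last_crawled" with
  | some v => (merged.insert "last_crawled" v).items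
  | none => []

-- ===== PRECONDITION & SPEC =====
-- Pre_ excludes exactly the inputs where new lacks the key 'last_crawled': there both Pythons raise KeyError.
def Pre_merge_castings (existing : Option (List (String × String))) (new : List (String × String)) : Prop :=
  "last_crawled" ∈ new.map Prod.fst
instance (existing : Option (List (String × String))) (new : List (String × String)) : Decidable (Pre_merge_castings existing new) := by unfold Pre_merge_castings; infer_instance

def pvWitness_merge_castings : (Option (List (String × String))) × (List (String × String)) :=
  (some [("custom_notes", "keep"), ("title", "old")], [("title", "new"), ("last_crawled", "2024")])

def Spec_merge_castings (existing : Option (List (String × String))) (new : List (String × String)) (out : List (String × String)) : Prop := out = merge_castings_alt existing new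
instance (existing : Option (List (String × String))) (new : List (String × String)) (out : List (String × String)) : Decidable (Spec_merge_castings existing new out) := by unfold Spec_merge_castings; infer_instance

-- ===== CLAIM (what is proved, stated in full; the proofs are below) =====
def Claim_equal_merge_castings : Prop := ∀ (existing : Option (List (String × String))) (new : List (String × String)), Dom_merge_castings existing new → Pre_merge_castings existing new → Spec_merge_castings existing new (merge_castings existing new)

-- ===== LEMMAS AND PROOFS =====

def pvP : List String := ["custom_notes", "manual_edits", "local_metadata"]

-- value each base item ends up with, expressed against the list l of new items
def pvG (l : List (String × String)) (p : String × String) : String × String :=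
  (p.1, if pvP.contains p.1 then p.2 else ((l.find? (fun q => q.1 == p.1)).map Prod.snd).getD p.2)

lemma find?_none_of_not_mem (l : List (String × String)) (k : String)
    (h : k ∉ l.map Prod.fst) : l.find? (fun q => q.1 == k) = none := by
  refine List.find?_eq_none.mpr ?_
  intro x hx hbe
  exact h (List.mem_map.mpr ⟨x, hx, by simpa using hbe⟩)

lemma key_ne_of_not_contains (d : PySem.Dict String String) (k : String)
    (h : d.contains k = false) {p : String × String} (hp : p ∈ d.items) : p.1 ≠ k := by
  intro hk
  have h' : d.items.any (fun q => q.1 == k) = false := h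
  have := List.any_eq_false.mp h' p hp
  exact this (by simp [hk])

lemma merge_fold (l : List (String × String)) (d : PySem.Dict String String)
    (hl : (l.map Prod.fst).Nodup) :
    (l.foldl (fun m kv =>
        if !(pvP.contains kv.1) || !(m.contains kv.1) then m.insert kv.1 kv.2 else m) d).items
      = d.items.map (pvG l) ++ l.filter (fun p => !(d.contains p.1)) := by
  induction l generalizing d with
  | nil =>
    have hm : d.items.map (pvG []) = d.items.map id :=
      List.map_congr_left (fun p _ => by simp [pvG])
    simp [hm]
  | cons kv t ih =>
    obtain ⟨k, v⟩ := kv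
    rw [List.map_cons] at hl
    have hknot : k ∉ t.map Prod.fst := (List.nodup_cons.mp hl).1
    have htnd : (t.map Prod.fst).Nodup := (List.nodup_cons.mp hl).2
    have hfindt : t.find? (fun q => q.1 == k) = none := find?_none_of_not_mem t k hknot
    by_cases hc : d.contains k = true
    · by_cases hp : pvP.contains k = true
      · -- preserved and already present: skip
        have hg : (!(pvP.contains k) || !(d.contains k)) = false := by rw [hp, hc]; rfl
        have hstep : (if !(pvP.contains k) || !(d.contains k) then d.insert k v else d) = d := by
          simp only [hg]; exact if_neg (by simp)
        rw [List.foldl_cons]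
        simp only [hstep]
        rw [ih d htnd]
        have hmap : d.items.map (pvG t) = d.items.map (pvG ((k, v) :: t)) := by
          refine List.map_congr_left (fun p _ => ?_)
          have hpmem : k ∈ pvP := by simpa using hp
          by_cases hpk : p.1 = k
          · simp [pvG, hpk, hpmem]
          · have hkp : (k == p.1) = false := by
              simp only [beq_eq_false_iff_ne]; exact fun h => hpk h.symm
            simp [pvG, List.find?, hkp]
        rw [hmap, List.filter_cons]
        simp [hc]
      · -- present but not preserved: overwrite in place
        have hp' : pvP.contains k = false := by simpa using hp
        have hg : (!(pvP.contains k) || !(d.contains k)) = true := by rw [hp']; rfl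
        have hstep : (if !(pvP.contains k) || !(d.contains k) then d.insert k v else d)
            = d.insert k v := by simp only [hg]; exact if_pos trivial
        rw [List.foldl_cons]
        simp only [hstep]
        rw [ih _ htnd]
        have hitems := PySem.Dict.items_insert_of_contains d v hc
        have hmap : ((d.insert k v).items).map (pvG t) = d.items.map (pvG ((k, v) :: t)) := by
          rw [hitems, List.map_map]
          refine List.map_congr_left (fun p _ => ?_)
          have hpn : k ∉ pvP := by simpa using hp'
          by_cases hpk : p.1 = k
          · have hpkb : (p.1 == k) = true := by simpa using hpk
            simp [pvG, Function.comp, hpk, hpn, hfindt, List.find?]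
          · have hpkb : (p.1 == k) = false := by simpa using hpk
            have hkp : (k == p.1) = false := by
              simp only [beq_eq_false_iff_ne]; exact fun h => hpk h.symm
            simp [pvG, Function.comp, hpkb, List.find?, hkp]
        have hfil : t.filter (fun p => !((d.insert k v).contains p.1))
            = t.filter (fun p => !(d.contains p.1)) := by
          refine List.filter_congr (fun p hpt => ?_)
          have hne : (p.1 == k) = false := by
            simp only [beq_eq_false_iff_ne]
            exact fun hpk => hknot (List.mem_map.mpr ⟨p, hpt, hpk⟩)
          rw [PySem.Dict.contains_insert, hne]
          simp
        rw [hmap, hfil, List.filter_cons]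
        simp [hc]
    · -- fresh key: append
      have hc' : d.contains k = false := by simpa using hc
      have hg : (!(pvP.contains k) || !(d.contains k)) = true := by rw [hc']; simp
      have hstep : (if !(pvP.contains k) || !(d.contains k) then d.insert k v else d)
          = d.insert k v := by simp only [hg]; exact if_pos trivial
      rw [List.foldl_cons]
      simp only [hstep]
      rw [ih _ htnd]
      have hitems := PySem.Dict.items_insert_of_not_contains d v hc'
      have hmap : ((d.insert k v).items).map (pvG t)
          = d.items.map (pvG ((k, v) :: t)) ++ [pvG t (k, v)] := by
        rw [hitems, List.map_append]
        congr 1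
        refine List.map_congr_left (fun p hpd => ?_)
        have hpk : p.1 ≠ k := key_ne_of_not_contains d k hc' hpd
        have hkp : (k == p.1) = false := by
          simp only [beq_eq_false_iff_ne]; exact fun h => hpk h.symm
        simp [pvG, List.find?, hkp]
      have hgkv : pvG t (k, v) = (k, v) := by simp [pvG, hfindt]
      have hfil : t.filter (fun p => !((d.insert k v).contains p.1))
          = t.filter (fun p => !(d.contains p.1)) := by
        refine List.filter_congr (fun p hpt => ?_)
        have hne : (p.1 == k) = false := by
          simp only [beq_eq_false_iff_ne]
          exact fun hpk => hknot (List.mem_map.mpr ⟨p, hpt, hpk⟩)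
        rw [PySem.Dict.contains_insert, hne]
        simp
      rw [hmap, hgkv, hfil, List.filter_cons]
      simp [hc']

-- the keys of a dict built by ofList are nodup, stated over items
lemma nodup_items_fst (l : List (String × String)) :
    ((PySem.Dict.ofList l).items.map Prod.fst).Nodup := by
  have := PySem.Dict.nodup_keys_ofList (κ := String) (ν := String) l
  simpa [PySem.Dict.keys] using this

-- B's per-item value equals pvG over the new items
lemma g_eq (newd : PySem.Dict String String) (p : String × String) :
    (p.1, if pvP.contains p.1 || !(newd.contains p.1) then p.2 else (newd.get? p.1).getD p.2)
      = pvG newd.items p := by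
  by_cases hp : p.1 ∈ pvP
  · simp [pvG, hp]
  · by_cases hc : newd.contains p.1 = true
    · simp [pvG, hp, hc, PySem.Dict.get?]
    · have hc' : newd.contains p.1 = false := by simpa using hc
      have hf : newd.items.find? (fun q => q.1 == p.1) = none := by
        have hn : newd.get? p.1 = none :=
          (PySem.Dict.get?_eq_none_iff_contains newd p.1).mpr hc'
        simpa [PySem.Dict.get?] using hn
      simp [pvG, hp, hc', hf]

-- dict(pairs) on a pair list with distinct keys keeps the list as is
lemma items_ofList_fresh (l : List (String × String)) (h : (l.map Prod.fst).Nodup) :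
    (PySem.Dict.ofList l).items = l := by
  have := PySem.Dict.items_foldl_insert_fresh (d := (PySem.Dict.empty : PySem.Dict String String))
      (l := l) (k := Prod.fst) (v := Prod.snd) (by simp) h
  simpa [PySem.Dict.ofList, PySem.Dict.update] using this

-- contains restated over the item keys
lemma contains_eq_mem_items_fst (d : PySem.Dict String String) (k : String) :
    d.contains k = true ↔ k ∈ d.items.map Prod.fst := by
  have := PySem.Dict.contains_iff_mem_keys (d := d) (k := k)
  simpa [PySem.Dict.keys] using this

-- A's base expression equals B's base expression
lemma base_eq (existing : Option (List (String × String))) :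
    (match existing with
      | none => (PySem.Dict.empty : PySem.Dict String String)
      | some l => if l.isEmpty then PySem.Dict.empty else PySem.Dict.ofList l)
      = PySem.Dict.ofList (existing.getD []) := by
  cases existing with
  | none => rfl
  | some l =>
    by_cases h : l.isEmpty = true
    · have : l = [] := List.isEmpty_iff.mp h
      simp [this]
      rfl
    · have h' : l.isEmpty = false := by simpa using h
      simp [h']

-- the two merged dicts coincide before the final last_crawled assignment
lemma merged_dict_eq (b newd : PySem.Dict String String)
    (hb : (b.items.map Prod.fst).Nodup) (hn : (newd.items.map Prod.fst).Nodup) :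
    newd.items.foldl (fun m kv =>
        if !(pvP.contains kv.1) || !(m.contains kv.1) then m.insert kv.1 kv.2 else m) b
      = PySem.Dict.ofList (newd.items.foldl (fun acc kv =>
          if !(b.contains kv.1) then acc ++ [kv] else acc)
          (b.items.foldl (fun acc kv =>
            acc ++ [(kv.1, if pvP.contains kv.1 || !(newd.contains kv.1) then kv.2
                           else (newd.get? kv.1).getD kv.2)]) [])) := by
  apply PySem.Dict.ext
  rw [PySem.List.foldl_append_singleton_eq_map, PySem.List.foldl_append_if_eq_filter,
      List.nil_append, merge_fold newd.items b hn]
  have hmap : b.items.map (fun kv =>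
      (kv.1, if pvP.contains kv.1 || !(newd.contains kv.1) then kv.2
             else (newd.get? kv.1).getD kv.2)) = b.items.map (pvG newd.items) :=
    List.map_congr_left (fun p _ => g_eq newd p)
  rw [hmap, items_ofList_fresh]
  rw [List.map_append, List.map_map]
  have hmk : b.items.map (Prod.fst ∘ pvG newd.items) = b.items.map Prod.fst :=
    List.map_congr_left (fun p _ => rfl)
  rw [hmk]
  refine List.Nodup.append hb ?_ ?_
  · exact hn.sublist (List.Sublist.map Prod.fst (List.filter_sublist (l := newd.items)))
  · intro k hk1 hk2
    have hkc : b.contains k = true := (contains_eq_mem_items_fst b k).mpr hk1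
    obtain ⟨p, hp, hpk⟩ := List.mem_map.mp hk2
    have := List.of_mem_filter hp
    rw [hpk, hkc] at this
    simp at this

-- ===== VERDICT (by name: the statement is the Claim_ definition above) =====
theorem merge_castings_spec : Claim_equal_merge_castings := by
  intro existing new _ _
  unfold Spec_merge_castings merge_castings merge_castings_alt
  simp only
  rw [show (["custom_notes", "manual_edits", "local_metadata"] : List String) = pvP from rfl]
  rw [base_eq existing]
  rw [merged_dict_eq (PySem.Dict.ofList (existing.getD [])) (PySem.Dict.ofList new)
      (nodup_items_fst _) (nodup_items_fst _)]
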